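-- pv_equiv track=rewrite | github.com/alexis-bruneau/Alexis-Website | app/Redfin/run_pipeline.py | is_real_image_url
-- ===== SOURCE A (Python) =====
-- def is_real_image_url(url):
--     """Filter out Redfin branding/logo/placeholder URLs."""
--     if not url:
--         return False
--     bad_patterns = [
--         "redfin-logo", "redfin_logo", "rf-logo",
--         "/logos/", "/branding/", "/favicon",
--         "redfin-default", "no-photo", "placeholder",
--         "social-share", "og-image-default",
--         "/vLATEST/images/",  # Redfin's static assets path
--     ]
--     url_lower = url.lower()
--     return not any(p in url_lower for p in bad_patterns)
-- ===== SOURCE B (Python) =====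
-- _BAD = (
--     "redfin-logo", "redfin_logo", "rf-logo",
--     "/logos/", "/branding/", "/favicon",
--     "redfin-default", "no-photo", "placeholder",
--     "social-share", "og-image-default",
--     "/vLATEST/images/",
-- )
--
--
-- def _begins_with(s, p, i):
--     """Hand-rolled prefix test: does pattern p start at position i of s?"""
--     for ch in p:
--         if i >= len(s) or s[i] != ch:
--             return False
--         i += 1
--     return True
--
--
-- def is_real_image_url(url):
--     """Filter out Redfin branding/logo/placeholder URLs.
--     Single suffix scan with hand-rolled character matching: walk positions
--     left to right and test character-by-character whether any bad pattern
--     starts there, instead of one full library substring search per pattern."""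
--     if not url:
--         return False
--     s = url.lower()
--     i = 0
--     while i < len(s):
--         if any(_begins_with(s, p, i) for p in _BAD):
--             return False
--         i += 1
--     return True
-- ===== Notes on version B (the rewrite author's own statement) =====
-- stated objective: alternative
-- what changed: Instead of one full library substring search per pattern (12 passes over the URL), B walks the URL's positions once and, at each position, matches the patterns character by character with a hand-rolled prefix test, early-exiting on the first hit.
import Mathlib
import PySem

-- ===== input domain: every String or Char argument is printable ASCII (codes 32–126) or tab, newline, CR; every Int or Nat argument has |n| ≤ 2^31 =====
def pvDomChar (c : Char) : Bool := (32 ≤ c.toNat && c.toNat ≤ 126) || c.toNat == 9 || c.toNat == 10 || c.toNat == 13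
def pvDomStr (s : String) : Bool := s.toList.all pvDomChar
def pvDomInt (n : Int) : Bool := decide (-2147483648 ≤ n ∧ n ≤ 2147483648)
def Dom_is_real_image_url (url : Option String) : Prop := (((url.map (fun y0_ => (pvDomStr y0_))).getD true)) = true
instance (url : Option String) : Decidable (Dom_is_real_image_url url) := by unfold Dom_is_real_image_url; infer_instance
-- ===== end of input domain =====

-- B replaces A's per-pattern library substring searches by one suffix scan with hand-rolled character-by-character prefix matching (objective: alternative).

-- the bad-pattern literals shared by both Pythons (pure data, used by both ports)
def badPatterns : List String :=
  ["redfin-logo", "redfin_logo", "rf-logo",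
   "/logos/", "/branding/", "/favicon",
   "redfin-default", "no-photo", "placeholder",
   "social-share", "og-image-default",
   "/vLATEST/images/"]

-- ===== PORT A =====
def is_real_image_url (url : Option String) : Bool :=
  match url with
  | none => false
  | some u =>
    if u = "" then false          -- "if not url: return False" (None or empty string)
    else
      let url_lower := PySem.Str.lower u
      !(badPatterns.any (fun p => PySem.Str.isIn p url_lower))

-- ===== PORT B =====
-- _begins_with(s, p, i): character-by-character prefix test, here on the suffix s.drop i
def pvBeginsWith : List Char → List Char → Bool
  | _, [] => true
  | [], _ :: _ => false
  | c :: s, d :: p => c == d && pvBeginsWith s p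

-- the while loop "i = 0; while i < len(s): … ; i += 1" walking the suffixes of s
def pvSuffixScan : List Char → Bool
  | [] => false
  | c :: rest =>
      ((badPatterns.map String.toList).any (fun p => pvBeginsWith (c :: rest) p)) || pvSuffixScan rest

def is_real_image_url_alt (url : Option String) : Bool :=
  url.elim false (fun u => (u != "") && !pvSuffixScan (PySem.Chars.lower u.toList))

-- ===== PRECONDITION & SPEC =====
def Spec_is_real_image_url (url : Option String) (out : Bool) : Prop := out = is_real_image_url_alt url
instance (url : Option String) (out : Bool) : Decidable (Spec_is_real_image_url url out) := by unfold Spec_is_real_image_url; infer_instance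

-- ===== CLAIM (what is proved, stated in full; the proofs are below) =====
def Claim_equal_is_real_image_url : Prop := ∀ (url : Option String), Dom_is_real_image_url url → Spec_is_real_image_url url (is_real_image_url url)

-- ===== LEMMAS AND PROOFS =====

lemma pvBeginsWith_iff (p s : List Char) : pvBeginsWith s p = true ↔ p <+: s := by
  induction p generalizing s with
  | nil => simp [pvBeginsWith]
  | cons d p ih =>
    cases s with
    | nil => simp [pvBeginsWith]
    | cons c s =>
      rw [show pvBeginsWith (c :: s) (d :: p) = (c == d && pvBeginsWith s p) from rfl,
        Bool.and_eq_true, beq_iff_eq, List.cons_prefix_cons, ih]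
      exact and_congr_left (fun _ => eq_comm)

-- the suffix scan finds a pattern iff some pattern is a prefix of some suffix
lemma pvSuffixScan_iff (s : List Char) :
    pvSuffixScan s = true ↔ ∃ p ∈ badPatterns, ∃ i, p.toList <+: s.drop i := by
  induction s with
  | nil =>
    rw [show pvSuffixScan [] = false from rfl]
    simp only [List.drop_nil, List.prefix_nil, Bool.false_eq_true, false_iff]
    rintro ⟨p, hp, _, h⟩
    have hne : ∀ p ∈ badPatterns, p.toList ≠ [] := by decide
    exact hne p hp h
  | cons c rest ih =>
    simp only [pvSuffixScan, Bool.or_eq_true, List.any_eq_true, List.mem_map, ih]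
    constructor
    · rintro (⟨q, ⟨p, hp, rfl⟩, hq⟩ | ⟨p, hp, i, hi⟩)
      · exact ⟨p, hp, 0, by simpa using (pvBeginsWith_iff _ _).mp hq⟩
      · exact ⟨p, hp, i + 1, by simpa using hi⟩
    · rintro ⟨p, hp, i, hi⟩
      cases i with
      | zero => exact Or.inl ⟨p.toList, ⟨p, hp, rfl⟩, (pvBeginsWith_iff _ _).mpr (by simpa using hi)⟩
      | succ i => exact Or.inr ⟨p, hp, i, by simpa using hi⟩

-- hence it coincides with "some pattern is a substring" (A's per-pattern searches)
lemma pvSuffixScan_eq_any_isIn (s : List Char) :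
    pvSuffixScan s = (badPatterns.any (fun p => PySem.Chars.isIn p.toList s)) := by
  apply Bool.eq_iff_iff.mpr
  rw [pvSuffixScan_iff]
  simp only [List.any_eq_true]
  constructor
  · rintro ⟨p, hp, i, hi⟩
    exact ⟨p, hp, (PySem.Chars.exists_prefix_drop_iff_isIn p.toList s).mp ⟨i, hi⟩⟩
  · rintro ⟨p, hp, h⟩
    obtain ⟨i, hi⟩ := (PySem.Chars.exists_prefix_drop_iff_isIn p.toList s).mpr h
    exact ⟨p, hp, i, hi⟩

-- ===== VERDICT (by name: the statement is the Claim_ definition above) =====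
theorem is_real_image_url_spec : Claim_equal_is_real_image_url := by
  intro url _
  unfold Spec_is_real_image_url is_real_image_url is_real_image_url_alt
  cases url with
  | none => rfl
  | some u =>
    by_cases h : u = ""
    · simp [h]
    · simp only [h, if_false, Option.elim]
      rw [pvSuffixScan_eq_any_isIn]
      simp [PySem.Str.isIn_eq, PySem.Str.toList_lower, h]
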